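-- pv_equiv track=rewrite | github.com/christoaluckal/coconut-coordinates | xml_testing/b_train_split (copy).py | getBBKeys
-- ===== SOURCE A (Python) =====
-- def getBBKeys(box_list,height,width):
--     box_key = {}
--     for i in range(0,3):
--         for j in range(0,3):
--             box_key[str(i)+"_"+str(j)] = []
--     for x in box_list:
--         y_min,x_min,y_max,x_max = int(x[0]),int(x[1]),int(x[2]),int(x[3])
--         if(y_min < height//2):
--             if(x_min < width//2):
--                 if(y_max < height//2):
--                     if(x_max < width//2):
--                         box_key["0_0"].append([y_min,x_min,y_max,x_max])
--                     else:
--                         box_key["0_1"].append([y_min,x_min,y_max,x_max])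
--                 else:
--                     if(x_max < width //2):
--                         box_key["1_0"].append([y_min,x_min,y_max,x_max])
--                     else:
--                         box_key["1_1"].append([y_min,x_min,y_max,x_max])
--             else:
--                 if(y_max < height//2):
--                     box_key["0_2"].append([y_min,x_min,y_max,x_max])
--                 else:
--                     box_key["1_2"].append([y_min,x_min,y_max,x_max])
--         else:
--             if(x_min < width//2):
--                 if(x_max < width//2):
--                     box_key["2_0"].append([y_min,x_min,y_max,x_max])
--                 else:
--                     box_key["2_1"].append([y_min,x_min,y_max,x_max])
--             else:
--                 box_key["2_2"].append([y_min,x_min,y_max,x_max])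
--     return box_key
-- ===== SOURCE B (Python) =====
-- def getBBKeys(box_list, height, width):
--     # Group boxes per quadrant bucket: classify each coordinate pair into a
--     # 3-way row/column index and build each of the nine buckets by filtering.
--     h2 = height // 2
--     w2 = width // 2
--     boxes = [[int(b[0]), int(b[1]), int(b[2]), int(b[3])] for b in box_list]
--     def row(b):
--         return 2 if b[0] >= h2 else (0 if b[2] < h2 else 1)
--     def col(b):
--         return 2 if b[1] >= w2 else (0 if b[3] < w2 else 1)
--     return {"%d_%d" % (i, j): [b for b in boxes if row(b) == i and col(b) == j]
--             for i in range(3) for j in range(3)}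
-- ===== Notes on version B (the rewrite author's own statement) =====
-- stated objective: alternative
-- what changed: Replaces A's single mutating pass through a 4-deep nested if tree over a pre-built dict with two independent 3-way row/column classifiers and a dict comprehension that builds each of the nine buckets by filtering, so no dict mutation and no branch tree remain.
import Mathlib
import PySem

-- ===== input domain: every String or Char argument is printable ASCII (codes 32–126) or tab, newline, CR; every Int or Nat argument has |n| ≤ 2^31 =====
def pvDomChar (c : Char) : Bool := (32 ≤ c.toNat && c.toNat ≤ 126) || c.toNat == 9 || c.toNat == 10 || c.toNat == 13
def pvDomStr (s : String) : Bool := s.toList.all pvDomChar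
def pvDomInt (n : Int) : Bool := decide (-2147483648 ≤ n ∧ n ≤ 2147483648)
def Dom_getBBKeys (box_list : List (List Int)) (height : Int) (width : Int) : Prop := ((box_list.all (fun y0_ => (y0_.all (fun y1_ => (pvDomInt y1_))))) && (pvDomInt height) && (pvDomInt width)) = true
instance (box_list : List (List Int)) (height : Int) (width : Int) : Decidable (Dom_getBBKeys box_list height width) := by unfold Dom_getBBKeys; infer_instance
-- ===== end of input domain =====

-- B buckets the boxes by two independent 3-way coordinate classifications and builds each
-- of the nine buckets by a filter, instead of A's single mutating pass through a 4-deep if tree.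

-- ===== PORT A =====
-- the dict pre-populated with the nine empty buckets "0_0" .. "2_2"
def pvInitA : PySem.Dict String (List (List Int)) :=
  (PySem.List.pyRange 0 3 1).foldl (fun d i =>
    (PySem.List.pyRange 0 3 1).foldl (fun d j =>
      d.insert (PySem.Int.toStr i ++ "_" ++ PySem.Int.toStr j) ([] : List (List Int))) d)
    PySem.Dict.empty

-- the loop body; x[0..3] read with pyGetD (exact under Pre_: every box has ≥ 4 entries),
-- int() on an int is the identity; box_key[k].append(v) is modify k (· ++ [v]) (k always present)
def pvStepA (height width : Int) (d : PySem.Dict String (List (List Int))) (x : List Int) :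
    PySem.Dict String (List (List Int)) :=
  let y_min := PySem.List.pyGetD x 0 0
  let x_min := PySem.List.pyGetD x 1 0
  let y_max := PySem.List.pyGetD x 2 0
  let x_max := PySem.List.pyGetD x 3 0
  if y_min < PySem.Int.floordiv height 2 then
    if x_min < PySem.Int.floordiv width 2 then
      if y_max < PySem.Int.floordiv height 2 then
        if x_max < PySem.Int.floordiv width 2 then
          d.modify "0_0" [] (· ++ [[y_min, x_min, y_max, x_max]])
        else
          d.modify "0_1" [] (· ++ [[y_min, x_min, y_max, x_max]])
      else
        if x_max < PySem.Int.floordiv width 2 then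
          d.modify "1_0" [] (· ++ [[y_min, x_min, y_max, x_max]])
        else
          d.modify "1_1" [] (· ++ [[y_min, x_min, y_max, x_max]])
    else
      if y_max < PySem.Int.floordiv height 2 then
        d.modify "0_2" [] (· ++ [[y_min, x_min, y_max, x_max]])
      else
        d.modify "1_2" [] (· ++ [[y_min, x_min, y_max, x_max]])
  else
    if x_min < PySem.Int.floordiv width 2 then
      if x_max < PySem.Int.floordiv width 2 then
        d.modify "2_0" [] (· ++ [[y_min, x_min, y_max, x_max]])
      else
        d.modify "2_1" [] (· ++ [[y_min, x_min, y_max, x_max]])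
    else
      d.modify "2_2" [] (· ++ [[y_min, x_min, y_max, x_max]])

def getBBKeys (box_list : List (List Int)) (height : Int) (width : Int) :
    List (String × List (List Int)) :=
  (box_list.foldl (pvStepA height width) pvInitA).items

-- ===== PORT B =====
-- row(b) = 2 if b[0] >= h2 else (0 if b[2] < h2 else 1)
def pvRowB (h2 : Int) (b : List Int) : Int :=
  if h2 ≤ PySem.List.pyGetD b 0 0 then 2
  else if PySem.List.pyGetD b 2 0 < h2 then 0 else 1

-- col(b) = 2 if b[1] >= w2 else (0 if b[3] < w2 else 1)
def pvColB (w2 : Int) (b : List Int) : Int :=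
  if w2 ≤ PySem.List.pyGetD b 1 0 then 2
  else if PySem.List.pyGetD b 3 0 < w2 then 0 else 1

-- the dict comprehension over i, j in range(3); its keys are distinct, so the dict is this list
def getBBKeys_alt (box_list : List (List Int)) (height : Int) (width : Int) :
    List (String × List (List Int)) :=
  let h2 := PySem.Int.floordiv height 2
  let w2 := PySem.Int.floordiv width 2
  let boxes := box_list.map (fun b =>
    [PySem.List.pyGetD b 0 0, PySem.List.pyGetD b 1 0,
     PySem.List.pyGetD b 2 0, PySem.List.pyGetD b 3 0])
  (PySem.List.pyRange 0 3 1).flatMap (fun i =>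
    (PySem.List.pyRange 0 3 1).map (fun j =>
      (PySem.Int.toStr i ++ "_" ++ PySem.Int.toStr j,
       boxes.filter (fun b => pvRowB h2 b == i && pvColB w2 b == j))))

-- ===== PRECONDITION & SPEC =====
-- Pre_ excludes boxes with fewer than 4 entries, on which Python A raises IndexError (B raises too).
def Pre_getBBKeys (box_list : List (List Int)) (height : Int) (width : Int) : Prop :=
  ∀ b ∈ box_list, 4 ≤ b.length
instance (box_list : List (List Int)) (height : Int) (width : Int) :
    Decidable (Pre_getBBKeys box_list height width) := by unfold Pre_getBBKeys; infer_instance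

def pvWitness_getBBKeys : List (List Int) × Int × Int := ([[0, 0, 5, 5], [3, 7, 4, 9]], 8, 10)

def Spec_getBBKeys (box_list : List (List Int)) (height : Int) (width : Int)
    (out : List (String × List (List Int))) : Prop := out = getBBKeys_alt box_list height width
instance (box_list : List (List Int)) (height : Int) (width : Int)
    (out : List (String × List (List Int))) : Decidable (Spec_getBBKeys box_list height width out) := by
  unfold Spec_getBBKeys; infer_instance

-- ===== CLAIM (what is proved, stated in full; the proofs are below) =====
def Claim_equal_getBBKeys : Prop := ∀ (box_list : List (List Int)) (height : Int) (width : Int), Dom_getBBKeys box_list height width → Pre_getBBKeys box_list height width → Spec_getBBKeys box_list height width (getBBKeys box_list height width)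

-- ===== LEMMAS AND PROOFS =====

def pvKey (r c : Int) : String := PySem.Int.toStr r ++ "_" ++ PySem.Int.toStr c

def pvVal (x : List Int) : List Int :=
  [PySem.List.pyGetD x 0 0, PySem.List.pyGetD x 1 0,
   PySem.List.pyGetD x 2 0, PySem.List.pyGetD x 3 0]

lemma pvRowB_cases (h2 : Int) (b : List Int) :
    pvRowB h2 b = 0 ∨ pvRowB h2 b = 1 ∨ pvRowB h2 b = 2 := by
  unfold pvRowB; split_ifs <;> simp

lemma pvColB_cases (w2 : Int) (b : List Int) :
    pvColB w2 b = 0 ∨ pvColB w2 b = 1 ∨ pvColB w2 b = 2 := by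
  unfold pvColB; split_ifs <;> simp

lemma pvStepA_eq (height width : Int) (d : PySem.Dict String (List (List Int))) (x : List Int) :
    pvStepA height width d x =
      d.modify (pvKey (pvRowB (PySem.Int.floordiv height 2) x)
                      (pvColB (PySem.Int.floordiv width 2) x)) []
        (· ++ [pvVal x]) := by
  simp only [pvStepA, pvRowB, pvColB, pvKey, pvVal]
  split_ifs <;> first | rfl | omega

lemma pvKey_eq_iff (r c i j : Int)
    (hr : r = 0 ∨ r = 1 ∨ r = 2) (hc : c = 0 ∨ c = 1 ∨ c = 2)
    (hi : i = 0 ∨ i = 1 ∨ i = 2) (hj : j = 0 ∨ j = 1 ∨ j = 2) :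
    (pvKey r c == pvKey i j) = (r == i && c == j) := by
  rcases hr with rfl | rfl | rfl <;> rcases hc with rfl | rfl | rfl <;>
    rcases hi with rfl | rfl | rfl <;> rcases hj with rfl | rfl | rfl <;> decide

-- A's bucket for key (i, j), extracted from the pair list
lemma pvValA (h2 w2 i j : Int) (hi : i = 0 ∨ i = 1 ∨ i = 2) (hj : j = 0 ∨ j = 1 ∨ j = 2)
    (bl : List (List Int)) :
    ((bl.map (fun x => (pvKey (pvRowB h2 x) (pvColB w2 x), pvVal x))).filter
        (fun p => p.1 == pvKey i j)).map (fun p => p.2)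
      = (bl.filter (fun x => pvRowB h2 x == i && pvColB w2 x == j)).map pvVal := by
  rw [List.filter_map, List.map_map]
  have hp : ((fun (p : String × List Int) => p.1 == pvKey i j) ∘
      (fun x => (pvKey (pvRowB h2 x) (pvColB w2 x), pvVal x)))
      = fun x => pvRowB h2 x == i && pvColB w2 x == j :=
    funext fun x => pvKey_eq_iff _ _ _ _ (pvRowB_cases _ _) (pvColB_cases _ _) hi hj
  rw [hp]; rfl

-- B's bucket for (i, j), pulled back through the normalisation map
lemma pvValB (h2 w2 i j : Int) (bl : List (List Int)) :
    (bl.map pvVal).filter (fun b => pvRowB h2 b == i && pvColB w2 b == j)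
      = (bl.filter (fun x => pvRowB h2 x == i && pvColB w2 x == j)).map pvVal := by
  rw [List.filter_map]; rfl

lemma pvInitA_keys : pvInitA.keys = ["0_0", "0_1", "0_2", "1_0", "1_1", "1_2", "2_0", "2_1", "2_2"] := by
  decide

lemma pvFold_keys (h2 w2 : Int) (bl : List (List Int)) :
    ((bl.map (fun x => (pvKey (pvRowB h2 x) (pvColB w2 x), pvVal x))).foldl
        (fun d p => d.modify p.1 [] (· ++ [p.2])) pvInitA).keys = pvInitA.keys := by
  rw [PySem.Dict.keys_foldl_modify_key _ Prod.fst [] (fun _ p => (· ++ [p.2]))]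
  rw [PySem.Set.update_eq_append_filter]
  have hnil : ((PySem.Set.ofList ((bl.map (fun x => (pvKey (pvRowB h2 x) (pvColB w2 x), pvVal x))).map Prod.fst)).filter
      (fun y => !PySem.Set.contains pvInitA.keys y)) = [] := by
    apply List.filter_eq_nil_iff.mpr
    intro k hk
    have hk' := (PySem.Set.mem_ofList _ _).mp hk
    rw [List.map_map] at hk'
    obtain ⟨x, _, rfl⟩ := List.mem_map.mp hk'
    rcases pvRowB_cases h2 x with hr | hr | hr <;> rcases pvColB_cases w2 x with hc | hc | hc <;>
      simp only [Function.comp_apply, hr, hc, pvInitA_keys] <;> decide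
  rw [hnil, List.append_nil]

theorem getBBKeys_spec : Claim_equal_getBBKeys := by
  intro bl height width _ _
  unfold Spec_getBBKeys getBBKeys getBBKeys_alt
  have hstep : pvStepA height width = fun d x =>
      d.modify (pvKey (pvRowB (PySem.Int.floordiv height 2) x)
                      (pvColB (PySem.Int.floordiv width 2) x)) [] (· ++ [pvVal x]) :=
    funext fun d => funext fun x => pvStepA_eq height width d x
  rw [hstep]
  set h2 := PySem.Int.floordiv height 2 with hh2
  set w2 := PySem.Int.floordiv width 2 with hw2
  rw [show (List.foldl (fun d x =>
        d.modify (pvKey (pvRowB h2 x) (pvColB w2 x)) [] (· ++ [pvVal x])) pvInitA bl)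
      = ((bl.map (fun x => (pvKey (pvRowB h2 x) (pvColB w2 x), pvVal x))).foldl
        (fun d p => d.modify p.1 [] (· ++ [p.2])) pvInitA) from (List.foldl_map
        (f := fun x => (pvKey (pvRowB h2 x) (pvColB w2 x), pvVal x))
        (g := fun d p => d.modify p.1 [] (· ++ [p.2])) (l := bl) (init := pvInitA)).symm]
  have hkeys := pvFold_keys h2 w2 bl
  have hnd : ((bl.map (fun x => (pvKey (pvRowB h2 x) (pvColB w2 x), pvVal x))).foldl
      (fun d p => d.modify p.1 [] (· ++ [p.2])) pvInitA).keys.Nodup := by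
    rw [hkeys, pvInitA_keys]; decide
  rw [PySem.Dict.items_eq_map_keys _ hnd ([] : List (List Int))]
  rw [hkeys, pvInitA_keys]
  simp only [List.map_cons, List.map_nil]
  simp only [PySem.Dict.getD_foldl_modify_append]
  have h00 : pvInitA.getD "0_0" [] = [] := by decide
  have h01 : pvInitA.getD "0_1" [] = [] := by decide
  have h02 : pvInitA.getD "0_2" [] = [] := by decide
  have h10 : pvInitA.getD "1_0" [] = [] := by decide
  have h11 : pvInitA.getD "1_1" [] = [] := by decide
  have h12 : pvInitA.getD "1_2" [] = [] := by decide
  have h20 : pvInitA.getD "2_0" [] = [] := by decide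
  have h21 : pvInitA.getD "2_1" [] = [] := by decide
  have h22 : pvInitA.getD "2_2" [] = [] := by decide
  rw [h00, h01, h02, h10, h11, h12, h20, h21, h22]
  simp only [List.nil_append]
  rw [show PySem.List.pyRange 0 3 1 = [0, 1, 2] from by decide]
  simp only [List.flatMap_cons, List.flatMap_nil, List.map_cons, List.map_nil,
    List.append_nil, List.cons_append, List.nil_append]
  have hA : ∀ (i j : Int), (i = 0 ∨ i = 1 ∨ i = 2) → (j = 0 ∨ j = 1 ∨ j = 2) →
      ((bl.map (fun x => (pvKey (pvRowB h2 x) (pvColB w2 x), pvVal x))).filter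
        (fun p => p.1 == pvKey i j)).map (fun p => p.2)
      = (bl.map pvVal).filter (fun b => pvRowB h2 b == i && pvColB w2 b == j) := by
    intro i j hi hj
    rw [pvValA h2 w2 i j hi hj bl, pvValB]
  rw [show ("0_0" : String) = pvKey 0 0 from by decide,
      show ("0_1" : String) = pvKey 0 1 from by decide,
      show ("0_2" : String) = pvKey 0 2 from by decide,
      show ("1_0" : String) = pvKey 1 0 from by decide,
      show ("1_1" : String) = pvKey 1 1 from by decide,
      show ("1_2" : String) = pvKey 1 2 from by decide,
      show ("2_0" : String) = pvKey 2 0 from by decide,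
      show ("2_1" : String) = pvKey 2 1 from by decide,
      show ("2_2" : String) = pvKey 2 2 from by decide]
  rw [hA 0 0 (by simp) (by simp), hA 0 1 (by simp) (by simp), hA 0 2 (by simp) (by simp),
      hA 1 0 (by simp) (by simp), hA 1 1 (by simp) (by simp), hA 1 2 (by simp) (by simp),
      hA 2 0 (by simp) (by simp), hA 2 1 (by simp) (by simp), hA 2 2 (by simp) (by simp)]
  rfl
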